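-- pv_equiv track=rewrite | github.com/Proxy2552/advent_calendar | fonction.py | fake_id2
-- ===== SOURCE A (Python) =====
-- def fake_id2(L):
--     fakelist = []
--     for i in L:
--         S = str(i)
--         n = len(S)
--         est_fake = False
--         for k in range(1, n // 2 + 1):
--             if n % k == 0:
--                 R = n // k
--                 M = S[:k]
--                 if S == M * R:
--                     est_fake = True
--                     break
--         if est_fake:
--             fakelist.append(i)
--     return fakelist
-- ===== SOURCE B (Python) =====
-- def fake_id2(L):
--     return [i for i in L if _is_repeated(str(i))]
--
-- def _is_repeated(S):
--     # S is a repetition of a shorter block iff S occurs inside (S+S) at a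
--     # position other than 0 and len(S)  (classic rotation trick)
--     return S in (S + S)[1:-1]
-- ===== Notes on version B (the rewrite author's own statement) =====
-- stated objective: faster
-- what changed: replaces the per-element divisor loop (try every k | n, build S[:k]*R and compare) with the single rotation test S in (S+S)[1:-1], and the accumulator loop with a list comprehension
import Mathlib
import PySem

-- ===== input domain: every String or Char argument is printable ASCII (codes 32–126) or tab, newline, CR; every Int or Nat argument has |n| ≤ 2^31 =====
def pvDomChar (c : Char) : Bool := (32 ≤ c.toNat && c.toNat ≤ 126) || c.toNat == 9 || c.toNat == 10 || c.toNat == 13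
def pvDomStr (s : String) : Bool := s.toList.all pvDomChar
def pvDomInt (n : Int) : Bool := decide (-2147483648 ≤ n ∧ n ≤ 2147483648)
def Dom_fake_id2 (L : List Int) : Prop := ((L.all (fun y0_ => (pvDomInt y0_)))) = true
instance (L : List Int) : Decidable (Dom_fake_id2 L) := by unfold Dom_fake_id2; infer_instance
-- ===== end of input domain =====

-- B replaces A's per-element divisor loop (build S[:k]*R for every k dividing len(S) and
-- compare) with the single rotation test  S in (S+S)[1:-1], and the accumulator loop with a
-- list comprehension.


-- ===== PORT A =====
-- A's inner 'for k in range(1, n//2+1)' with its break: recursion over the remaining ks.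
def pvLoopA (S : List Char) (n : Int) : List Int → Bool
  | [] => false
  | k :: ks =>
    if PySem.Int.mod n k = 0 then
      let R := PySem.Int.floordiv n k
      let M := PySem.List.slice S none (some k)
      if S = PySem.List.pyRepeat M R then true
      else pvLoopA S n ks
    else pvLoopA S n ks

def fake_id2 (L : List Int) : List Int :=
  L.foldl (fun fakelist i =>
    let S := PySem.Int.toChars i
    let n : Int := S.length
    let est_fake := pvLoopA S n (PySem.List.pyRange 1 (PySem.Int.floordiv n 2 + 1) 1)
    if est_fake then fakelist ++ [i] else fakelist) []

-- ===== PORT B =====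
-- B's helper _is_repeated(S):  S in (S + S)[1:-1]
def pvIsRepeated (S : List Char) : Bool :=
  PySem.Chars.isIn S (PySem.List.slice (S ++ S) (some 1) (some (-1)))

def fake_id2_alt (L : List Int) : List Int :=
  L.filter (fun i => pvIsRepeated (PySem.Int.toChars i))

-- ===== PRECONDITION & SPEC =====
def Spec_fake_id2 (L : List Int) (out : List Int) : Prop := out = fake_id2_alt L
instance (L : List Int) (out : List Int) : Decidable (Spec_fake_id2 L out) := by unfold Spec_fake_id2; infer_instance

-- ===== CLAIM (what is proved, stated in full; the proofs are below) =====
def Claim_equal_fake_id2 : Prop := ∀ (L : List Int), Dom_fake_id2 L → Spec_fake_id2 L (fake_id2 L)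

-- ===== LEMMAS AND PROOFS =====

def RotFix (s : List Char) (p : ℕ) : Prop :=
  ∀ i < s.length, s[i]? = s[(i + p) % s.length]?

theorem toChars_ne_nil (i : Int) : PySem.Int.toChars i ≠ [] := by
  unfold PySem.Int.toChars
  split
  · simp
  · intro h
    have : 0 < (Nat.toDigits 10 i.toNat).length := Nat.length_toDigits_pos
    simp [h] at this

theorem rotFix_mod {s : List Char} {p : ℕ} (h : RotFix s p) : RotFix s (p % s.length) := by
  intro i hi
  rw [h i hi]
  congr 1
  conv_rhs => rw [Nat.add_mod, Nat.mod_mod_of_dvd _ (dvd_refl _), ← Nat.add_mod]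

theorem rotFix_add {s : List Char} {p q : ℕ} (hp : RotFix s p) (hq : RotFix s q) :
    RotFix s (p + q) := by
  intro i hi
  have hn : 0 < s.length := Nat.lt_of_le_of_lt (Nat.zero_le _) hi
  rw [hp i hi, hq _ (Nat.mod_lt _ hn)]
  congr 1
  conv_lhs => rw [Nat.add_mod, Nat.mod_mod_of_dvd _ (dvd_refl _), ← Nat.add_mod]
  rw [Nat.add_assoc]

theorem rotFix_mul {s : List Char} {p : ℕ} (hp : RotFix s p) (a : ℕ) : RotFix s (a * p) := by
  induction a with
  | zero => intro i hi; simp [Nat.mod_eq_of_lt hi]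
  | succ a ih => rw [Nat.succ_mul]; exact rotFix_add ih hp

theorem rotFix_gcd {s : List Char} {p : ℕ} (hp : RotFix s p) (h1 : 1 ≤ p)
    (h2 : p < s.length) : RotFix s (Nat.gcd p s.length) := by
  set n := s.length with hn
  have hnpos : 0 < n := Nat.lt_of_le_of_lt (Nat.zero_le _) h2
  have hbez : (Nat.gcd p n : ℤ) = p * Nat.gcdA p n + n * Nat.gcdB p n := Nat.gcd_eq_gcd_ab p n
  -- a := gcdA reduced mod n, as a Nat
  set x : ℤ := Nat.gcdA p n with hx
  have hxmod : 0 ≤ x % n := Int.emod_nonneg x (by exact_mod_cast hnpos.ne')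
  set a : ℕ := (x % n).toNat with ha
  have key : (Nat.gcd p n) % n = (a * p) % n := by
    have h1 : ((Nat.gcd p n : ℤ)) % n = ((a : ℤ) * p) % n := by
      have hax : ((a : ℤ)) = x % n := by rw [ha]; exact Int.toNat_of_nonneg hxmod
      rw [hbez, Int.add_mul_emod_self_left, hax, Int.mul_comm ((x : ℤ) % n) (p : ℤ), Int.mul_emod (p : ℤ) x,
        Int.mul_emod (p : ℤ) ((x : ℤ) % n), Int.emod_emod_of_dvd _ (dvd_refl _)]
    have h2 : ((Nat.gcd p n % n : ℕ) : ℤ) = (((a * p) % n : ℕ) : ℤ) := by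
      push_cast
      rw [h1]
    exact_mod_cast h2
  have hg : Nat.gcd p n % n = Nat.gcd p n := Nat.mod_eq_of_lt (Nat.lt_of_le_of_lt (Nat.gcd_le_left _ h1) h2)
  have := rotFix_mod (rotFix_mul hp a)
  rw [← hn] at this
  rw [← key, hg] at this
  exact this

theorem rotFix_index_mod {s : List Char} {g : ℕ} (hg : 0 < g)
    (h : RotFix s g) : ∀ i < s.length, s[i]? = s[i % g]? := by
  intro i hi
  induction i using Nat.strong_induction_on with
  | _ i ih =>
    by_cases hlt : i < g
    · rw [Nat.mod_eq_of_lt hlt]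
    · push Not at hlt
      have hig : i - g < i := by omega
      have h1 : s[i - g]? = s[i]? := by
        have := h (i - g) (by omega)
        rwa [Nat.sub_add_cancel hlt, Nat.mod_eq_of_lt hi] at this
      have h2 := ih (i - g) hig (by omega)
      rw [← h1, h2]
      congr 1
      conv_rhs => rw [show i = (i - g) + g by omega, Nat.add_mod_right]

theorem rotFix_of_index_mod {s : List Char} {g : ℕ} (_hg : 0 < g) (hdvd : g ∣ s.length)
    (h : ∀ i < s.length, s[i]? = s[i % g]?) : RotFix s g := by
  intro i hi
  have hn : 0 < s.length := Nat.lt_of_le_of_lt (Nat.zero_le _) hi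
  rw [h i hi, h ((i + g) % s.length) (Nat.mod_lt _ hn)]
  congr 1
  rw [Nat.mod_mod_of_dvd _ hdvd, Nat.add_mod_right]

theorem rep_get (M : List Char) (m i : ℕ) (h : i < m * M.length) :
    ((List.replicate m M).flatten)[i]? = M[i % M.length]? := by
  induction m generalizing i with
  | zero => omega
  | succ m ih =>
    rw [List.replicate_succ, List.flatten_cons]
    by_cases hi : i < M.length
    · rw [List.getElem?_append_left hi, Nat.mod_eq_of_lt hi]
    · push Not at hi
      have hM : 0 < M.length := by
        rcases Nat.eq_zero_or_pos M.length with h0 | h0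
        · rw [h0, Nat.mul_zero] at h; omega
        · exact h0
      have h2 : i < m * M.length + M.length := by simpa [Nat.succ_mul] using h
      rw [List.getElem?_append_right hi, ih (i - M.length) (by omega)]
      congr 1
      conv_rhs => rw [show i = (i - M.length) + M.length by omega, Nat.add_mod_right]

theorem rep_length (M : List Char) (m : ℕ) : ((List.replicate m M).flatten).length = m * M.length := by
  simp [List.length_flatten]

theorem eq_pyRepeat_iff {s : List Char} {g : ℕ} (hg : 0 < g) (hdvd : g ∣ s.length) :
    s = PySem.List.pyRepeat (s.take g) ((s.length / g : ℕ) : Int) ↔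
      ∀ i < s.length, s[i]? = s[i % g]? := by
  rcases Nat.eq_zero_or_pos s.length with hn | hn
  · have hs : s = [] := List.eq_nil_of_length_eq_zero hn
    subst hs
    simp [PySem.List.pyRepeat]
  have hgle : g ≤ s.length := Nat.le_of_dvd hn hdvd
  have hMlen : (s.take g).length = g := by simp [Nat.min_eq_left hgle]
  have hrlen : (PySem.List.pyRepeat (s.take g) ((s.length / g : ℕ) : Int)).length = s.length := by
    rw [PySem.List.pyRepeat, Int.toNat_natCast, rep_length, hMlen, Nat.div_mul_cancel hdvd]
  constructor
  · intro heq i hi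
    conv_lhs => rw [heq]
    rw [PySem.List.pyRepeat, Int.toNat_natCast,
      rep_get _ _ _ (by rw [hMlen, Nat.div_mul_cancel hdvd]; exact hi), hMlen,
      List.getElem?_take_of_lt (Nat.mod_lt _ hg)]
  · intro h
    apply List.ext_getElem?
    intro i
    by_cases hi : i < s.length
    · rw [PySem.List.pyRepeat, Int.toNat_natCast,
        rep_get _ _ _ (by rw [hMlen, Nat.div_mul_cancel hdvd]; exact hi), hMlen,
        List.getElem?_take_of_lt (Nat.mod_lt _ hg)]
      exact h i hi
    · push Not at hi
      rw [List.getElem?_eq_none hi, List.getElem?_eq_none (by rw [hrlen]; exact hi)]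

theorem pvLoopA_iff (s : List Char) (n : Int) (l : List Int) :
    pvLoopA s n l = true ↔ ∃ k ∈ l, PySem.Int.mod n k = 0 ∧
      s = PySem.List.pyRepeat (PySem.List.slice s none (some k)) (PySem.Int.floordiv n k) := by
  induction l with
  | nil => simp [pvLoopA]
  | cons k ks ih =>
    rw [pvLoopA]
    by_cases h1 : PySem.Int.mod n k = 0
    · rw [if_pos h1]
      dsimp only
      by_cases h2 : s = PySem.List.pyRepeat (PySem.List.slice s none (some k)) (PySem.Int.floordiv n k)
      · rw [if_pos h2]
        simp only [true_iff]
        exact ⟨k, List.mem_cons_self, h1, h2⟩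
      · rw [if_neg h2, ih]
        constructor
        · rintro ⟨k', hk', hm, he⟩; exact ⟨k', List.mem_cons_of_mem _ hk', hm, he⟩
        · rintro ⟨k', hk', hm, he⟩
          rcases List.mem_cons.mp hk' with rfl | hmem
          · exact absurd he h2
          · exact ⟨k', hmem, hm, he⟩
    · rw [if_neg h1, ih]
      constructor
      · rintro ⟨k', hk', hm, he⟩; exact ⟨k', List.mem_cons_of_mem _ hk', hm, he⟩
      · rintro ⟨k', hk', hm, he⟩
        rcases List.mem_cons.mp hk' with rfl | hmem
        · exact absurd hm h1
        · exact ⟨k', hmem, hm, he⟩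

theorem slice_mid (s : List Char) (hs : s ≠ []) :
    PySem.List.slice (s ++ s) (some 1) (some (-1)) = ((s ++ s).drop 1).take (2 * s.length - 2) := by
  have hnpos : 0 < s.length := List.length_pos_iff.mpr hs
  simp [PySem.List.slice]
  rw [Nat.min_eq_left (by omega), List.drop_one]
  congr 1
  omega

theorem append_get (s : List Char) (m : ℕ) (h : m < 2 * s.length) :
    (s ++ s)[m]? = s[m % s.length]? := by
  by_cases hm : m < s.length
  · rw [List.getElem?_append_left hm, Nat.mod_eq_of_lt hm]
  · push Not at hm
    rw [List.getElem?_append_right hm]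
    congr 1
    conv_lhs => rw [show m - s.length = (m - s.length) % s.length from
      (Nat.mod_eq_of_lt (by omega)).symm]
    conv_rhs => rw [show m = (m - s.length) + s.length by omega, Nat.add_mod_right]

theorem pvIsRepeated_iff (s : List Char) (hs : s ≠ []) :
    pvIsRepeated s = true ↔ ∃ p, 1 ≤ p ∧ p ≤ s.length - 1 ∧ RotFix s p := by
  have hnpos : 0 < s.length := List.length_pos_iff.mpr hs
  rw [pvIsRepeated, ← PySem.Chars.exists_prefix_drop_iff_isIn, slice_mid s hs]
  constructor
  · rintro ⟨j, hpre⟩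
    have hlen : s.length ≤ ((((s ++ s).drop 1).take (2 * s.length - 2)).drop j).length :=
      hpre.length_le
    simp only [List.length_drop, List.length_take, List.length_append] at hlen
    have hj : j ≤ s.length - 2 := by omega
    have hn2 : 2 ≤ s.length := by omega
    refine ⟨j + 1, by omega, by omega, ?_⟩
    intro i hi
    have heq := List.prefix_iff_eq_take.mp hpre
    have h1 : s[i]? = ((((s ++ s).drop 1).take (2 * s.length - 2)).drop j)[i]? := by
      conv_lhs => rw [heq]
      rw [List.getElem?_take_of_lt hi]
    rw [h1, List.getElem?_drop, List.getElem?_take_of_lt (by omega), List.getElem?_drop,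
      append_get s _ (by omega)]
    congr 2
    omega
  · rintro ⟨p, hp1, hp2, hrot⟩
    have hn2 : 2 ≤ s.length := by omega
    refine ⟨p - 1, ?_⟩
    rw [List.prefix_iff_eq_take]
    apply List.ext_getElem?
    intro i
    by_cases hi : i < s.length
    · rw [List.getElem?_take_of_lt hi, List.getElem?_drop,
        List.getElem?_take_of_lt (by omega), List.getElem?_drop,
        append_get s _ (by omega), hrot i hi]
      congr 1
      conv_rhs => rw [show 1 + (p - 1 + i) = i + p by omega]
    · push Not at hi
      rw [List.getElem?_eq_none hi, List.getElem?_eq_none]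
      simp only [List.length_take, List.length_drop, List.length_append]
      omega

theorem key (s : List Char) (hs : s ≠ []) :
    pvLoopA s (s.length : Int) (PySem.List.pyRange 1 (PySem.Int.floordiv (s.length : Int) 2 + 1) 1)
      = pvIsRepeated s := by
  have hnpos : 0 < s.length := List.length_pos_iff.mpr hs
  have h2 : PySem.Int.floordiv (s.length : ℤ) 2 = ((s.length / 2 : ℕ) : ℤ) := by
    exact_mod_cast PySem.Int.floordiv_natCast s.length 2
  apply Bool.eq_iff_iff.mpr
  rw [pvLoopA_iff, pvIsRepeated_iff s hs]
  constructor
  · rintro ⟨k, hk, hmod, heq⟩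
    rw [PySem.List.mem_pyRange_one] at hk
    obtain ⟨hk1, hk2⟩ := hk
    lift k to ℕ using (by omega)
    have hm1 : 1 ≤ k := by exact_mod_cast hk1
    have hm2 : k ≤ s.length / 2 := by rw [h2] at hk2; exact_mod_cast (by omega : (k:ℤ) ≤ ((s.length / 2 : ℕ) : ℤ))
    have hdvd : k ∣ s.length := by
      have := (PySem.Int.mod_eq_zero_iff_dvd _ _).mp hmod
      exact_mod_cast this
    rw [PySem.List.slice_to_natCast, PySem.Int.floordiv_natCast] at heq
    have hidx := (eq_pyRepeat_iff hm1 hdvd).mp heq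
    have hrot := rotFix_of_index_mod hm1 hdvd hidx
    have hn2 : 2 ≤ s.length := by omega
    exact ⟨k, hm1, by omega, hrot⟩
  · rintro ⟨p, hp1, hp2, hrot⟩
    have hn2 : 2 ≤ s.length := by omega
    set g := Nat.gcd p s.length with hg
    have hrotg : RotFix s g := rotFix_gcd hrot hp1 (by omega)
    have hgdvd : g ∣ s.length := Nat.gcd_dvd_right _ _
    have hgpos : 0 < g := Nat.gcd_pos_of_pos_right _ hnpos
    have hgp : g ≤ p := Nat.gcd_le_left _ hp1
    have hghalf : g ≤ s.length / 2 := by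
      rcases hgdvd with ⟨c, hc⟩
      have hc2 : 2 ≤ c := by
        rcases Nat.lt_or_ge c 2 with h | h
        · interval_cases c <;> omega
        · exact h
      rw [Nat.le_div_iff_mul_le (by omega)]
      calc g * 2 ≤ g * c := Nat.mul_le_mul_left _ hc2
        _ = s.length := hc.symm
    refine ⟨(g : ℤ), ?_, ?_, ?_⟩
    · rw [PySem.List.mem_pyRange_one, h2]
      constructor
      · exact_mod_cast hgpos
      · have : (g : ℤ) ≤ ((s.length / 2 : ℕ) : ℤ) := by exact_mod_cast hghalf
        omega
    · rw [PySem.Int.mod_eq_zero_iff_dvd]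
      exact_mod_cast hgdvd
    · rw [PySem.List.slice_to_natCast, PySem.Int.floordiv_natCast]
      exact (eq_pyRepeat_iff hgpos hgdvd).mpr (rotFix_index_mod hgpos hrotg)

-- ===== VERDICT (by name: the statement is the Claim_ definition above) =====
theorem fake_id2_spec : Claim_equal_fake_id2 := by
  intro L _
  unfold Spec_fake_id2 fake_id2 fake_id2_alt
  rw [show (fun (fakelist : List Int) (i : Int) =>
      let S := PySem.Int.toChars i
      let n : Int := S.length
      let est_fake := pvLoopA S n (PySem.List.pyRange 1 (PySem.Int.floordiv n 2 + 1) 1)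
      if est_fake then fakelist ++ [i] else fakelist)
    = (fun acc i => if (fun j => pvIsRepeated (PySem.Int.toChars j)) i = true then acc ++ [(fun j : Int => j) i] else acc)
    from funext fun acc => funext fun i => by
      simp only
      rw [key _ (toChars_ne_nil i)]]
  rw [PySem.List.foldl_append_if (fun j => pvIsRepeated (PySem.Int.toChars j)) (fun j : Int => j) L []]
  simp
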